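-- pv_equiv track=rewrite | github.com/daniel-reich/ubiquitous-fiesta | n2y4i74e9mFdwHNCi_11.py | get_items_at
-- ===== SOURCE A (Python) =====
-- def get_items_at(arr, par):
--   if len(arr) == 1:
--     return arr
--   if not arr:
--     return []
--   if par == 'odd':
--     return get_items_at(arr[:-2],'odd') + [arr[-1]]
--   return get_items_at(arr[:-3],'odd') + [arr[-2]]
-- ===== SOURCE B (Python) =====
-- def get_items_at(arr, par):
--     n = len(arr)
--     if n <= 1:
--         return list(arr)
--     keep = (n - 1) % 2 if par == 'odd' else n % 2
--     return [x for i, x in enumerate(arr) if i % 2 == keep]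
-- ===== Notes on version B (the rewrite author's own statement) =====
-- stated objective: faster
-- what changed: Replaced the recursive slice-and-concatenate (each step copies the list) by a single pass that keeps exactly the elements whose index has the selected parity.
import Mathlib
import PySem

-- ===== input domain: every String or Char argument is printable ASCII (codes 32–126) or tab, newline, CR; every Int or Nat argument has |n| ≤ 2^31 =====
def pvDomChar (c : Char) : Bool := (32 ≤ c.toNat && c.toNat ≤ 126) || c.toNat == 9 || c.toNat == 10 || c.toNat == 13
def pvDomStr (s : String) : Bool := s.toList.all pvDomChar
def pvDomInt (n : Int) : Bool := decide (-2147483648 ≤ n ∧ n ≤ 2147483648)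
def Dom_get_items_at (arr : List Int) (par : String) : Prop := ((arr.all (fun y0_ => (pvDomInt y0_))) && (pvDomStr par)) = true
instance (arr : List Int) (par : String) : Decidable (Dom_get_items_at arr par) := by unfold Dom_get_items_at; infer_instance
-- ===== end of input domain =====

-- B replaces A's recursive slice-and-concatenate with one linear pass keeping the
-- indices of the selected parity (objective: faster).

-- ===== PORT A =====
-- literal transliteration of Source A: recursion on ever-shorter slices of arr
def get_items_at (arr : List Int) (par : String) : List Int :=
  if arr.length == 1 then arr
  else if arr.isEmpty then []
  else if par == "odd" then
    get_items_at (PySem.List.slice arr none (some (-2))) "odd" ++ [PySem.List.pyGetD arr (-1) 0]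
  else
    get_items_at (PySem.List.slice arr none (some (-3))) "odd" ++ [PySem.List.pyGetD arr (-2) 0]
termination_by arr.length
decreasing_by
  · rw [PySem.List.slice_to_neg_ofNat arr 2 (by omega)]
    simp_all [List.isEmpty_iff]
    cases arr with
    | nil => simp_all
    | cons a t => simp_all; try omega
  · rw [PySem.List.slice_to_neg_ofNat arr 3 (by omega)]
    simp_all [List.isEmpty_iff]
    cases arr with
    | nil => simp_all
    | cons a t => simp_all; try omega

-- ===== PORT B =====
-- literal transliteration of Source B: pick the parity, then one filtering pass over enumerate(arr)
def get_items_at_alt (arr : List Int) (par : String) : List Int :=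
  if arr.length ≤ 1 then arr
  else
    let keep : Int :=
      if par == "odd" then PySem.Int.mod ((arr.length : Int) - 1) 2
      else PySem.Int.mod (arr.length : Int) 2
    ((PySem.List.enumerate arr 0).filter (fun p => PySem.Int.mod p.1 2 == keep)).map (fun p => p.2)

-- ===== PRECONDITION & SPEC =====
def Spec_get_items_at (arr : List Int) (par : String) (out : List Int) : Prop := out = get_items_at_alt arr par
instance (arr : List Int) (par : String) (out : List Int) : Decidable (Spec_get_items_at arr par out) := by unfold Spec_get_items_at; infer_instance

-- ===== CLAIM (what is proved, stated in full; the proofs are below) =====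
def Claim_equal_get_items_at : Prop := ∀ (arr : List Int) (par : String), Dom_get_items_at arr par → Spec_get_items_at arr par (get_items_at arr par)

-- ===== LEMMAS AND PROOFS =====

-- the filtering pass of B, generalized to an arbitrary enumeration start
def pvSel (l : List Int) (s keep : Int) : List Int :=
  ((PySem.List.enumerate l s).filter (fun p => PySem.Int.mod p.1 2 == keep)).map (fun p => p.2)

theorem pvModTwo (a : Int) : PySem.Int.mod a 2 = a % 2 :=
  PySem.Int.mod_eq_emod_of_pos (by omega)

theorem pvSel_nil (s keep : Int) : pvSel [] s keep = [] := rfl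

theorem pvSel_append (xs ys : List Int) (s keep : Int) :
    pvSel (xs ++ ys) s keep = pvSel xs s keep ++ pvSel ys (s + xs.length) keep := by
  simp [pvSel, PySem.List.enumerate_append, List.filter_append]

theorem pvSel_single_ne (u s keep : Int) (h : s % 2 ≠ keep) : pvSel [u] s keep = [] := by
  simp [pvSel, PySem.List.enumerate_cons, PySem.List.enumerate_nil, List.filter_cons, h]

theorem pvSel_pair (u v : Int) (s keep : Int) (h1 : s % 2 ≠ keep)
    (h2 : (s + 1) % 2 = keep) : pvSel [u, v] s keep = [v] := by
  simp [pvSel, PySem.List.enumerate_cons, PySem.List.enumerate_nil, List.filter_cons, h1, h2]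

theorem pvSel_pair_fst (u v : Int) (s keep : Int) (h1 : s % 2 = keep)
    (h2 : (s + 1) % 2 ≠ keep) : pvSel [u, v] s keep = [u] := by
  simp [pvSel, PySem.List.enumerate_cons, PySem.List.enumerate_nil, List.filter_cons, h1, h2]

-- characterisation of A on par = "odd": it is B's filtering pass with keep = (len-1) % 2
theorem get_items_at_odd_eq (arr : List Int) :
    get_items_at arr "odd" = pvSel arr 0 (PySem.Int.mod ((arr.length : Int) - 1) 2) := by
  by_cases h1 : arr.length = 1
  · obtain ⟨x, hx⟩ : ∃ x, arr = [x] := by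
      match arr, h1 with
      | [x], _ => exact ⟨x, rfl⟩
    subst hx
    rw [get_items_at]
    norm_num [pvSel, PySem.List.enumerate_cons, PySem.List.enumerate_nil, List.filter_cons]
  · by_cases h0 : arr.length = 0
    · have : arr = [] := by cases arr <;> simp_all
      subst this
      rw [get_items_at]
      simp [pvSel_nil]
    · -- arr.length ≥ 2
      have hn : 2 ≤ arr.length := by omega
      have hne : arr ≠ [] := by cases arr <;> simp_all
      rw [get_items_at]
      rw [if_neg (by simp [h1]), if_neg (by simp [List.isEmpty_iff, hne]), if_pos (by rfl)]
      rw [PySem.List.slice_to_neg_ofNat arr 2 (by omega)]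
      have htl : (arr.take (arr.length - 2)).length = arr.length - 2 := by
        simp
      set K := PySem.Int.mod ((arr.length : Int) - 1) 2 with hK
      have IH := get_items_at_odd_eq (arr.take (arr.length - 2))
      rw [htl] at IH
      have hc : ((arr.length - 2 : Nat) : Int) - 1 = (arr.length : Int) - 3 := by omega
      rw [hc] at IH
      have hk : PySem.Int.mod ((arr.length : Int) - 3) 2 = K := by
        rw [hK, pvModTwo, pvModTwo]; omega
      rw [hk] at IH
      obtain ⟨u, v, hd⟩ : ∃ u v, arr.drop (arr.length - 2) = [u, v] := by
        have hlen : (arr.drop (arr.length - 2)).length = 2 := by simp; omega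
        match hdr : arr.drop (arr.length - 2), hlen with
        | [u, v], _ => exact ⟨u, v, rfl⟩
      have hsplit : arr = arr.take (arr.length - 2) ++ [u, v] := by
        conv_lhs => rw [← List.take_append_drop (arr.length - 2) arr, hd]
      have hlast : PySem.List.pyGetD arr (-1) 0 = v := by
        conv_lhs => rw [hsplit]
        simp [PySem.List.pyGetD, PySem.List.pyGet?, PySem.List.pyIdx?]
      rw [hlast, IH]
      conv_rhs => rw [hsplit]
      rw [pvSel_append]
      congr 1
      have hcast : ((arr.take (arr.length - 2)).length : Int) = (arr.length : Int) - 2 := by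
        rw [htl]; omega
      rw [hcast]
      symm
      apply pvSel_pair
      · rw [hK, pvModTwo]; omega
      · rw [hK, pvModTwo]; omega
termination_by arr.length
decreasing_by simp; omega

-- ===== VERDICT (by name: the statement is the Claim_ definition above) =====
theorem get_items_at_spec : Claim_equal_get_items_at := by
  intro arr par _
  unfold Spec_get_items_at get_items_at_alt
  by_cases hle : arr.length ≤ 1
  · rw [if_pos (by simpa using hle)]
    match arr, hle with
    | [], _ => rw [get_items_at]; rfl
    | [x], _ => rw [get_items_at]; rfl
  · rw [if_neg (by simpa using hle)]
    have hn : 2 ≤ arr.length := by omega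
    have hne : arr ≠ [] := by cases arr <;> simp_all
    by_cases hodd : par = "odd"
    · subst hodd
      rw [if_pos (by rfl)]
      exact get_items_at_odd_eq arr
    · -- non-"odd" branch of A
      have hb : (par == "odd") = false := by simp [hodd]
      simp only [hb, Bool.false_eq_true, if_false]
      show get_items_at arr par = pvSel arr 0 (PySem.Int.mod ((arr.length : Int)) 2)
      set K := PySem.Int.mod ((arr.length : Int)) 2 with hK
      rw [get_items_at]
      rw [if_neg (by simp; omega), if_neg (by simp [List.isEmpty_iff, hne]), if_neg (by simp [hb])]
      rw [PySem.List.slice_to_neg_ofNat arr 3 (by omega)]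
      rw [get_items_at_odd_eq (arr.take (arr.length - 3))]
      by_cases h2 : arr.length = 2
      · -- arr = [u, v]
        obtain ⟨u, v, huv⟩ : ∃ u v, arr = [u, v] := by
          match arr, h2 with
          | [u, v], _ => exact ⟨u, v, rfl⟩
        subst huv
        have hK0 : K = 0 := by rw [hK]; rw [pvModTwo]; norm_num
        rw [hK0]
        norm_num [pvSel, pvSel_nil, PySem.List.enumerate_cons, PySem.List.enumerate_nil,
          List.filter_cons, pvModTwo, PySem.List.pyGetD, PySem.List.pyGet?, PySem.List.pyIdx?]
      · -- arr.length ≥ 3 : arr = take (n-3) ++ [u] ++ [v, w]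
        have hn3 : 3 ≤ arr.length := by omega
        have htl : (arr.take (arr.length - 3)).length = arr.length - 3 := by simp
        have hc : ((arr.take (arr.length - 3)).length : Int) - 1 = (arr.length : Int) - 4 := by
          rw [htl]; omega
        rw [hc]
        have hk : PySem.Int.mod ((arr.length : Int) - 4) 2 = K := by
          rw [hK, pvModTwo, pvModTwo]; omega
        rw [hk]
        obtain ⟨u, v, w, hd⟩ : ∃ u v w, arr.drop (arr.length - 3) = [u, v, w] := by
          have hlen : (arr.drop (arr.length - 3)).length = 3 := by simp; omega
          match hdr : arr.drop (arr.length - 3), hlen with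
          | [u, v, w], _ => exact ⟨u, v, w, rfl⟩
        have hsplit : arr = arr.take (arr.length - 3) ++ [u, v, w] := by
          conv_lhs => rw [← List.take_append_drop (arr.length - 3) arr, hd]
        have hsnd : PySem.List.pyGetD arr (-2) 0 = v := by
          conv_lhs => rw [hsplit]
          simp [PySem.List.pyGetD, PySem.List.pyGet?, PySem.List.pyIdx?]
        rw [hsnd]
        conv_rhs => rw [hsplit]
        rw [show ([u, v, w] : List Int) = [u] ++ [v, w] from rfl, ← List.append_assoc,
          pvSel_append, pvSel_append]
        have hu : pvSel [u] (0 + ((arr.take (arr.length - 3)).length : Int)) K = [] := by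
          apply pvSel_single_ne
          rw [htl, hK, pvModTwo]
          omega
        rw [hu, List.append_nil]
        congr 1
        symm
        rw [show (0 + ((arr.take (arr.length - 3) ++ [u]).length : Int)) = (arr.length : Int) - 2 from by simp [htl]; omega]
        apply pvSel_pair_fst
        · rw [hK, pvModTwo]; omega
        · rw [hK, pvModTwo]; omega
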